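-- pv_equiv track=rewrite | github.com/Julesc013/dominium | tools/dist/dist_tree_common.py | _source_is_excluded
-- ===== SOURCE A (Python) =====
-- EXCLUDED_RUNTIME_PREFIXES = (
--     "tools/auditx",
--     "tools/convergence",
--     "tools/dist",
--     "tools/release",
--     "tools/xstack/auditx",
--     "tools/xstack/controlx",
--     "tools/xstack/core",
--     "tools/xstack/extensions",
--     "tools/xstack/performx",
--     "tools/xstack/securex",
--     "tools/xstack/out",
--     "tools/xstack/repox",
--     "tools/xstack/testx",
-- )
--
-- EXCLUDED_RUNTIME_BASENAMES = {"__pycache__"}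
--
-- EXCLUDED_RUNTIME_FILES = {
--     "tools/xstack/bundle_list.py",
--     "tools/xstack/bundle_validate.py",
--     "tools/xstack/run.py",
--     "tools/xstack/session_boot.py",
--     "tools/xstack/session_control.py",
--     "tools/xstack/session_create.py",
--     "tools/xstack/session_script_run.py",
--     "tools/xstack/session_server.py",
--     "tools/xstack/session_surface.py",
--     "tools/xstack/srz_status.py",
--     "tools/xstack/testx_all.py",
--     "tools/xstack/ui_bind.py",
-- }
--
-- def _norm(path: str) -> str:
--     return str(path or "").replace("\\", "/")
--
-- def _source_is_excluded(rel_path: str) -> bool: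
--     token = _norm(rel_path)
--     if token in EXCLUDED_RUNTIME_FILES:
--         return True
--     if any(token == prefix or token.startswith(prefix + "/") for prefix in EXCLUDED_RUNTIME_PREFIXES):
--         return True
--     parts = [part for part in token.split("/") if part]
--     return any(part in EXCLUDED_RUNTIME_BASENAMES for part in parts)
-- ===== SOURCE B (Python) =====
-- EXCLUDED_RUNTIME_PREFIXES = (
--     "tools/auditx",
--     "tools/convergence",
--     "tools/dist",
--     "tools/release",
--     "tools/xstack/auditx",
--     "tools/xstack/controlx",
--     "tools/xstack/core",
--     "tools/xstack/extensions",
--     "tools/xstack/performx",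
--     "tools/xstack/securex",
--     "tools/xstack/out",
--     "tools/xstack/repox",
--     "tools/xstack/testx",
-- )
--
-- EXCLUDED_RUNTIME_BASENAMES = {"__pycache__"}
--
-- EXCLUDED_RUNTIME_FILES = {
--     "tools/xstack/bundle_list.py",
--     "tools/xstack/bundle_validate.py",
--     "tools/xstack/run.py",
--     "tools/xstack/session_boot.py",
--     "tools/xstack/session_control.py",
--     "tools/xstack/session_create.py",
--     "tools/xstack/session_script_run.py",
--     "tools/xstack/session_server.py",
--     "tools/xstack/session_surface.py",
--     "tools/xstack/srz_status.py",
--     "tools/xstack/testx_all.py",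
--     "tools/xstack/ui_bind.py",
-- }
--
-- _PREFIX_SET = set(EXCLUDED_RUNTIME_PREFIXES)
--
--
-- def _norm(path: str) -> str:
--     return str(path or "").replace("\\", "/")
--
--
-- def _source_is_excluded(rel_path: str) -> bool:
--     # Walk the path's own ancestor directories against a prefix set instead of
--     # scanning a fixed prefix list with startswith.
--     token = _norm(rel_path)
--     if token in EXCLUDED_RUNTIME_FILES:
--         return True
--     parts = token.split("/")
--     ancestor = parts[0]
--     if ancestor in _PREFIX_SET:
--         return True
--     for part in parts[1:]:
--         ancestor = ancestor + "/" + part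
--         if ancestor in _PREFIX_SET:
--             return True
--     return any(part in EXCLUDED_RUNTIME_BASENAMES for part in parts if part)
-- ===== Notes on version B (the rewrite author's own statement) =====
-- stated objective: alternative
-- what changed: Instead of scanning the 13-entry prefix tuple with an equality-or-startswith test per prefix, B splits the path once into segments and walks its own ancestor directories (cumulative joins of the segments), testing each against a prefix set; the basename test runs over the same split.
import Mathlib
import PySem

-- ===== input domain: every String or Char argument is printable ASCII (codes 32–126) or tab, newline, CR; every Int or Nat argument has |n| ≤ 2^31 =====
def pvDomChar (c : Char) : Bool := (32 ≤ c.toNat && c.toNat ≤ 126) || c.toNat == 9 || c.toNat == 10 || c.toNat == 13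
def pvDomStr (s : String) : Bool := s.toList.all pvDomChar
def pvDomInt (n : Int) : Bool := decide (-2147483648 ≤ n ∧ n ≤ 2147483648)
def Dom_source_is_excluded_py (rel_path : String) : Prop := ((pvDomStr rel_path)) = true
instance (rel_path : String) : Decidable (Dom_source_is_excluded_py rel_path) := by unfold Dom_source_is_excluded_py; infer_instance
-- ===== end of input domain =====

-- B walks the query path's own ancestor directories against a prefix set instead of
-- scanning the fixed prefix tuple with startswith (alternative data representation).

-- shared module constants (EXCLUDED_RUNTIME_PREFIXES tuple; the two Python sets are ported as
-- lists of their distinct elements, per the type convention)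
def pvPrefixes : List String :=
  ["tools/auditx", "tools/convergence", "tools/dist", "tools/release",
   "tools/xstack/auditx", "tools/xstack/controlx", "tools/xstack/core",
   "tools/xstack/extensions", "tools/xstack/performx", "tools/xstack/securex",
   "tools/xstack/out", "tools/xstack/repox", "tools/xstack/testx"]

def pvBasenames : List String := ["__pycache__"]

def pvFiles : List String :=
  ["tools/xstack/bundle_list.py", "tools/xstack/bundle_validate.py", "tools/xstack/run.py",
   "tools/xstack/session_boot.py", "tools/xstack/session_control.py", "tools/xstack/session_create.py",
   "tools/xstack/session_script_run.py", "tools/xstack/session_server.py", "tools/xstack/session_surface.py",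
   "tools/xstack/srz_status.py", "tools/xstack/testx_all.py", "tools/xstack/ui_bind.py"]

-- _norm: str(path or "").replace("\\", "/"); on a str argument `path or ""` is "" iff path is ""
def pyNorm (path : String) : String :=
  PySem.Str.replace (if path == "" then "" else path) "\\" "/"

-- ===== PORT A =====
def source_is_excluded_py (rel_path : String) : Bool :=
  let token := pyNorm rel_path
  if pvFiles.contains token then true
  else if pvPrefixes.any (fun pre => token == pre || PySem.Str.startswith token (pre ++ "/")) then true
  else
    -- token.split("/"): sep is nonempty so split? is always `some`; getD [] is unreachable
    let parts := ((PySem.Str.split? token "/").getD []).filter (fun part => !(part == ""))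
    parts.any (fun part => pvBasenames.contains part)

-- ===== PORT B =====
-- _PREFIX_SET = set(EXCLUDED_RUNTIME_PREFIXES): the distinct elements, in order
def pvPrefixSet : List String := pvPrefixes

-- the for-loop of Source B: extend the ancestor by one segment, test it against the prefix set
def ancScan : List String → String → Bool
  | [], _ => false
  | part :: rest, ancestor =>
      let ancestor2 := ancestor ++ "/" ++ part
      if pvPrefixSet.contains ancestor2 then true else ancScan rest ancestor2

def source_is_excluded_py_alt (rel_path : String) : Bool :=
  let token := pyNorm rel_path
  if pvFiles.contains token then true
  else
    let parts := (PySem.Str.split? token "/").getD []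
    let ancestor := parts.headD ""   -- parts[0]; split always yields at least one part
    if pvPrefixSet.contains ancestor then true
    else if ancScan (parts.drop 1) ancestor then true
    else parts.any (fun part => !(part == "") && pvBasenames.contains part)

-- ===== PRECONDITION & SPEC =====
def Spec_source_is_excluded_py (rel_path : String) (out : Bool) : Prop := out = source_is_excluded_py_alt rel_path
instance (rel_path : String) (out : Bool) : Decidable (Spec_source_is_excluded_py rel_path out) := by unfold Spec_source_is_excluded_py; infer_instance

-- ===== CLAIM (what is proved, stated in full; the proofs are below) =====
def Claim_equal_source_is_excluded_py : Prop := ∀ (rel_path : String), Dom_source_is_excluded_py rel_path → Spec_source_is_excluded_py rel_path (source_is_excluded_py rel_path)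

-- ===== LEMMAS AND PROOFS =====

-- cumulative prefixes of `cur ++ l` that end right before a '/' of l, plus the full token
def asc : List Char → List Char → List (List Char)
  | cur, [] => [cur]
  | cur, c :: rest => if c = '/' then cur :: asc (cur ++ [c]) rest else asc (cur ++ [c]) rest

-- the '/'-separated segments of l, the first one continuing seg
def segs : List Char → List Char → List (List Char)
  | seg, [] => [seg]
  | seg, c :: rest => if c = '/' then seg :: segs [] rest else segs (seg ++ [c]) rest

-- the ancestor chain B visits: a, a/p1, a/p1/p2, …
def joinsFrom : List Char → List (List Char) → List (List Char)
  | a, [] => [a]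
  | a, p :: r => a :: joinsFrom (a ++ '/' :: p) r

theorem segs_ne_nil (l : List Char) : ∀ seg, segs seg l ≠ [] := by
  induction l with
  | nil => intro seg; simp [segs]
  | cons c rest ih => intro seg; simp only [segs]; split <;> simp [ih]

theorem segs_shift (l : List Char) : ∀ s, segs s l = (segs [] l).modifyHead (s ++ ·) := by
  induction l with
  | nil => intro s; simp [segs]
  | cons c rest ih =>
      intro s
      simp only [segs]
      split
      · simp
      · simp only [List.nil_append]
        rw [ih (s ++ [c]), ih [c]]
        cases h : segs [] rest with
        | nil => exact absurd h (segs_ne_nil _ _)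
        | cons hd tl => simp

theorem go_single (fuel : Nat) : ∀ (l cur : List Char) (accs : List (List Char)),
    l.length ≤ fuel →
    PySem.Chars.splitOn.go ['/'] fuel l cur accs =
      accs.reverse ++ (segs [] l).modifyHead (cur.reverse ++ ·) := by
  induction fuel with
  | zero =>
      intro l cur accs h
      have : l = [] := List.eq_nil_of_length_eq_zero (Nat.le_zero.mp h)
      subst this
      simp [PySem.Chars.splitOn.go, segs]
  | succ fuel ih =>
      intro l cur accs h
      cases l with
      | nil => simp [PySem.Chars.splitOn.go, segs]
      | cons c rest =>
        by_cases hc : c = '/'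
        · subst hc
          have hpre : List.isPrefixOf ['/'] ('/' :: rest) = true := by
            simp [List.isPrefixOf]
          rw [PySem.Chars.splitOn.go]
          simp only [hpre, if_pos, List.length_cons, List.length_nil, List.drop_succ_cons,
            List.drop_zero]
          rw [ih rest [] (List.reverse cur :: accs) (by simpa using Nat.le_of_succ_le_succ h)]
          cases hs : segs [] rest with
          | nil => exact absurd hs (segs_ne_nil _ _)
          | cons hd tl => simp [segs, hs]
        · have hpre : List.isPrefixOf ['/'] (c :: rest) = false := by
            simp [List.isPrefixOf]
            intro h'; exact hc h'.symm
          rw [PySem.Chars.splitOn.go]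
          simp only [hpre, Bool.false_eq_true, if_false]
          rw [ih rest (c :: cur) accs (by simpa using Nat.le_of_succ_le_succ h)]
          have : segs [] (c :: rest) = (segs [] rest).modifyHead ([c] ++ ·) := by
            simp only [segs, if_neg hc]
            exact segs_shift rest [c]
          rw [this]
          cases hs : segs [] rest with
          | nil => exact absurd hs (segs_ne_nil _ _)
          | cons hd tl => simp

theorem splitOn_slash (l : List Char) : PySem.Chars.splitOn l ['/'] = segs [] l := by
  rw [PySem.Chars.splitOn, go_single (l.length + 1) l [] [] (Nat.le_succ _)]
  cases hs : segs [] l with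
  | nil => exact absurd hs (segs_ne_nil _ _)
  | cons hd tl => simp

theorem split_token (token : String) :
    PySem.Str.split? token "/" = some ((segs [] token.toList).map String.ofList) := by
  rw [PySem.Str.split?]
  have h1 : PySem.Chars.split? token.toList "/".toList =
      some (PySem.Chars.splitOn token.toList ['/']) := by
    rw [PySem.Chars.split?]; rfl
  rw [h1, splitOn_slash]
  rfl

theorem mem_asc (l : List Char) : ∀ (cur x : List Char),
    x ∈ asc cur l ↔ (∃ y, x = cur ++ y ∧ y ++ ['/'] <+: l) ∨ x = cur ++ l := by
  induction l with
  | nil =>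
      intro cur x
      simp only [asc, List.mem_singleton, List.append_nil]
      constructor
      · intro h; exact Or.inr h
      · rintro (⟨y, _, hy⟩ | h)
        · simp [List.prefix_nil] at hy
        · exact h
  | cons c rest ih =>
      intro cur x
      by_cases hc : c = '/'
      · subst hc
        have ha : asc cur ('/' :: rest) = cur :: asc (cur ++ ['/']) rest := by simp [asc]
        rw [ha]
        simp only [List.mem_cons, ih]
        constructor
        · rintro (h | ⟨y, hx, hy⟩ | h)
          · exact Or.inl ⟨[], by simpa using h, by simp⟩
          · exact Or.inl ⟨'/' :: y, by simpa using hx, by simpa [List.cons_prefix_cons] using hy⟩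
          · exact Or.inr (by simpa using h)
        · rintro (⟨y, hx, hy⟩ | h)
          · cases y with
            | nil => exact Or.inl (by simpa using hx)
            | cons y0 ys =>
                rw [List.cons_append, List.cons_prefix_cons] at hy
                exact Or.inr (Or.inl ⟨ys, by simp [hx, hy.1], hy.2⟩)
          · exact Or.inr (Or.inr (by simpa using h))
      · have ha : asc cur (c :: rest) = asc (cur ++ [c]) rest := by simp [asc, hc]
        rw [ha, ih]
        constructor
        · rintro (⟨y, hx, hy⟩ | h)
          · exact Or.inl ⟨c :: y, by simpa using hx, by simp [List.cons_prefix_cons, hy]⟩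
          · exact Or.inr (by simpa using h)
        · rintro (⟨y, hx, hy⟩ | h)
          · cases y with
            | nil =>
                simp only [List.nil_append] at hy
                rw [List.cons_prefix_cons] at hy
                exact absurd hy.1.symm hc
            | cons y0 ys =>
                rw [List.cons_append, List.cons_prefix_cons] at hy
                exact Or.inl ⟨ys, by simp [hx, hy.1], hy.2⟩
          · exact Or.inr (by simpa using h)

-- the list of boundary prefixes of l is B's ancestor chain over the segments of l
theorem asc_joins (l : List Char) : ∀ cur,
    asc cur l = joinsFrom (cur ++ (segs [] l).headD []) ((segs [] l).drop 1) := by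
  induction l with
  | nil => intro cur; simp [asc, segs, joinsFrom]
  | cons c rest ih =>
      intro cur
      by_cases hc : c = '/'
      · subst hc
        have ha : asc cur ('/' :: rest) = cur :: asc (cur ++ ['/']) rest := by simp [asc]
        have hs : segs [] ('/' :: rest) = [] :: segs [] rest := by simp [segs]
        rw [ha, hs, ih]
        cases h : segs [] rest with
        | nil => exact absurd h (segs_ne_nil _ _)
        | cons hd tl => simp [joinsFrom]
      · have ha : asc cur (c :: rest) = asc (cur ++ [c]) rest := by simp [asc, hc]
        have hs : segs [] (c :: rest) = (segs [] rest).modifyHead ([c] ++ ·) := by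
          simp only [segs, if_neg hc, List.nil_append]
          exact segs_shift rest [c]
        rw [ha, hs, ih]
        cases h : segs [] rest with
        | nil => exact absurd h (segs_ne_nil _ _)
        | cons hd tl => simp

-- B's chain check over the segment strings = membership test along the joinsFrom list
theorem scan_eq : ∀ (tl : List (List Char)) (a : List Char),
    (pvPrefixSet.contains (String.ofList a) || ancScan (tl.map String.ofList) (String.ofList a))
    = (joinsFrom a tl).any (fun x => pvPrefixSet.contains (String.ofList x)) := by
  intro tl
  induction tl with
  | nil => intro a; simp [ancScan, joinsFrom]
  | cons p r ih =>
      intro a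
      have hj : String.ofList a ++ "/" ++ String.ofList p = String.ofList (a ++ '/' :: p) := by
        apply String.toList_inj.mp
        simp
      have h1 : ancScan ((p :: r).map String.ofList) (String.ofList a) =
          (pvPrefixSet.contains (String.ofList (a ++ '/' :: p)) ||
           ancScan (r.map String.ofList) (String.ofList (a ++ '/' :: p))) := by
        simp only [List.map_cons, ancScan, hj]
        cases pvPrefixSet.contains (String.ofList (a ++ '/' :: p)) <;> simp
      rw [h1]
      simp only [joinsFrom, List.any_cons]
      rw [← ih (a ++ '/' :: p)]

-- prefix side: A's `token == p or startswith(p + "/")` scan hits exactly the boundary prefixes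
theorem prefix_side (token : String) :
    pvPrefixes.any (fun pre => token == pre || PySem.Str.startswith token (pre ++ "/")) =
      (asc [] token.toList).any (fun x => pvPrefixSet.contains (String.ofList x)) := by
  rw [Bool.eq_iff_iff]
  simp only [List.any_eq_true, Bool.or_eq_true, beq_iff_eq, PySem.Str.startswith_eq,
    PySem.Chars.startswith_iff, String.toList_append, pvPrefixSet, List.contains_eq_mem,
    decide_eq_true_eq, mem_asc]
  constructor
  · rintro ⟨p, hp, h | h⟩
    · exact ⟨token.toList, Or.inr rfl, by simpa [h] using hp⟩
    · exact ⟨p.toList, Or.inl ⟨p.toList, by simp, by simpa using h⟩, by simpa using hp⟩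
  · rintro ⟨x, hx, hmem⟩
    rcases hx with ⟨y, hxy, hy⟩ | hx
    · simp only [List.nil_append] at hxy
      subst hxy
      refine ⟨String.ofList x, hmem, Or.inr ?_⟩
      simpa using hy
    · simp only [List.nil_append] at hx
      subst hx
      exact ⟨String.ofList token.toList, hmem, Or.inl (by simp)⟩

-- basename side: A filters the empty parts first, B skips them inside the any
theorem base_side (token : String) :
    ((((PySem.Str.split? token "/").getD []).filter (fun part => !(part == ""))).any
        (fun part => pvBasenames.contains part)) =
      (((PySem.Str.split? token "/").getD []).any
        (fun part => !(part == "") && pvBasenames.contains part)) := by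
  rw [List.any_filter]

-- ===== VERDICT (by name: the statement is the Claim_ definition above) =====
theorem source_is_excluded_py_spec : Claim_equal_source_is_excluded_py := by
  intro rel_path _
  unfold Spec_source_is_excluded_py
  simp only [source_is_excluded_py, source_is_excluded_py_alt]
  by_cases hf : pvFiles.contains (pyNorm rel_path) = true
  · rw [if_pos hf, if_pos hf]
  · rw [if_neg hf, if_neg hf]
    rw [base_side]
    rw [split_token]
    set token := pyNorm rel_path with htok
    cases hs : segs [] token.toList with
    | nil => exact absurd hs (segs_ne_nil _ _)
    | cons hd tl =>
      have hpref : pvPrefixes.any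
          (fun pre => token == pre || PySem.Str.startswith token (pre ++ "/")) =
          (pvPrefixSet.contains (String.ofList hd) ||
           ancScan (tl.map String.ofList) (String.ofList hd)) := by
        rw [prefix_side, asc_joins token.toList [], hs, scan_eq]
        simp
      simp only [Option.getD_some, List.map_cons, List.headD_cons, List.drop_one, List.tail_cons]
      rw [hpref]
      cases h1 : pvPrefixSet.contains (String.ofList hd) <;>
        cases h2 : ancScan (tl.map String.ofList) (String.ofList hd) <;> simp
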